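-- pv_equiv track=rewrite | github.com/xsolsticex/connect4 | backend/events.py | comprobar_filas
-- ===== SOURCE A (Python) =====
-- def comprobar_filas(tablero, color):
--     for row in tablero:
--         contador = 0
--         for celda in row:
--             if celda == color:
--                 contador += 1
--                 if contador == 4:
--                     return True
--             else:
--                 contador = 0
--     return False
-- ===== SOURCE B (Python) =====
-- def comprobar_filas(tablero, color):
--     return any(
--         all(row[i + j] == color for j in range(4))
--         for row in tablero
--         for i in range(len(row) - 3)
--     )
-- ===== Notes on version B (the rewrite author's own statement) =====
-- stated objective: idiomatic
-- what changed: Replaces the resetting run-length counter with an any/all sliding-window test over starting indices, rescanning each 4-cell window instead of maintaining an accumulator.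
import Mathlib
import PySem

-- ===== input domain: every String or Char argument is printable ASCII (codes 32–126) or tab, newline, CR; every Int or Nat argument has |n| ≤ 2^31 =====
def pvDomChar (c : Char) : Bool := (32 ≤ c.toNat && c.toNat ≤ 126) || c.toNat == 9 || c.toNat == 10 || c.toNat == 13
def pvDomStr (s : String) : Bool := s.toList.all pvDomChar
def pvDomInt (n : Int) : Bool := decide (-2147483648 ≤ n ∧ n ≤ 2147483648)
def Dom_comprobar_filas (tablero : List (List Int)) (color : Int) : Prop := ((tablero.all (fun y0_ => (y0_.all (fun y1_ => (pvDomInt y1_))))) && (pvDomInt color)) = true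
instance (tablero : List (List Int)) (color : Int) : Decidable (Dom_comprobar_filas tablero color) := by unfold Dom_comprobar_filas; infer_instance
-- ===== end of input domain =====

-- B replaces A's resetting run-length counter with an idiomatic any/all sliding-window
-- test over starting indices; same asymptotic cost, no speed claim.

-- ===== PORT A =====
-- inner 'for celda in row' loop of A, carrying the counter 'contador' (= k);
-- returning true models A's early 'return True'
def rowCheckA (color : Int) : List Int → Nat → Bool
  | [], _ => false
  | celda :: rest, contador =>
      if celda == color then
        (if contador + 1 == 4 then true else rowCheckA color rest (contador + 1))
      else rowCheckA color rest 0

def comprobar_filas (tablero : List (List Int)) (color : Int) : Bool :=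
  tablero.any (fun row => rowCheckA color row 0)

-- ===== PORT B =====
-- any(all(row[i+j] == color for j in range(4)) for row in tablero for i in range(len(row)-3))
def comprobar_filas_alt (tablero : List (List Int)) (color : Int) : Bool :=
  tablero.any (fun row =>
    (List.range (row.length - 3)).any (fun i =>
      (List.range 4).all (fun j =>
        PySem.List.pyGet? row ((i : Int) + (j : Int)) == some color)))

-- ===== PRECONDITION & SPEC =====
def Spec_comprobar_filas (tablero : List (List Int)) (color : Int) (out : Bool) : Prop := out = comprobar_filas_alt tablero color
instance (tablero : List (List Int)) (color : Int) (out : Bool) : Decidable (Spec_comprobar_filas tablero color out) := by unfold Spec_comprobar_filas; infer_instance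

-- ===== CLAIM (what is proved, stated in full; the proofs are below) =====
def Claim_equal_comprobar_filas : Prop := ∀ (tablero : List (List Int)) (color : Int), Dom_comprobar_filas tablero color → Spec_comprobar_filas tablero color (comprobar_filas tablero color)

-- ===== LEMMAS AND PROOFS =====

/-- 'the first n cells of xs equal c' -/
def prefRun (c : Int) (n : Nat) (xs : List Int) : Prop := ∀ j < n, xs[j]? = some c

/-- 'the 4-cell window starting at i is all c' -/
def winP (c : Int) (xs : List Int) (i : Nat) : Prop := ∀ j < 4, xs[i + j]? = some c

def hasWin (c : Int) (xs : List Int) : Prop := ∃ i, winP c xs i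

theorem prefRun_cons (c x : Int) (n : Nat) (t : List Int) :
    prefRun c (n + 1) (x :: t) ↔ x = c ∧ prefRun c n t := by
  constructor
  · intro h
    refine ⟨by simpa using h 0 (by omega), fun j hj => ?_⟩
    simpa using h (j + 1) (by omega)
  · rintro ⟨hx, h⟩ j hj
    cases j with
    | zero => simpa using hx
    | succ j => simpa using h j (by omega)

theorem prefRun_mono (c : Int) {m n : Nat} (h : m ≤ n) {xs : List Int} :
    prefRun c n xs → prefRun c m xs := fun hp j hj => hp j (by omega)

theorem winP_zero (c : Int) (xs : List Int) : winP c xs 0 ↔ prefRun c 4 xs := by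
  unfold winP prefRun; simp

theorem winP_cons_succ (c x : Int) (t : List Int) (i : Nat) :
    winP c (x :: t) (i + 1) ↔ winP c t i := by
  unfold winP
  constructor
  · intro h j hj
    have := h j hj
    rwa [show i + 1 + j = (i + j) + 1 by omega, List.getElem?_cons_succ] at this
  · intro h j hj
    rw [show i + 1 + j = (i + j) + 1 by omega, List.getElem?_cons_succ]
    exact h j hj

theorem hasWin_cons (c x : Int) (t : List Int) :
    hasWin c (x :: t) ↔ winP c (x :: t) 0 ∨ hasWin c t := by
  constructor
  · rintro ⟨i, hi⟩
    cases i with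
    | zero => exact Or.inl hi
    | succ i => exact Or.inr ⟨i, (winP_cons_succ c x t i).mp hi⟩
  · rintro (h | ⟨i, hi⟩)
    · exact ⟨0, h⟩
    · exact ⟨i + 1, (winP_cons_succ c x t i).mpr hi⟩

/-- characterisation of A's inner loop -/
theorem rowCheckA_iff (c : Int) (xs : List Int) :
    ∀ k : Nat, k < 4 →
      (rowCheckA c xs k = true ↔ prefRun c (4 - k) xs ∨ hasWin c xs) := by
  induction xs with
  | nil =>
      intro k hk
      simp only [rowCheckA]
      constructor
      · intro h; exact absurd h (by simp)
      · rintro (h | ⟨i, hi⟩)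
        · have := h 0 (by omega); simp at this
        · have := hi 0 (by omega); simp at this
  | cons x t ih =>
      intro k hk
      by_cases hx : x = c
      · by_cases hk4 : k + 1 = 4
        · have hxs : rowCheckA c (x :: t) k = true := by
            simp [rowCheckA, hx]
            left; omega
          rw [hxs]
          simp only [true_iff]
          left
          intro j hj
          have : j = 0 := by omega
          subst this
          simpa using hx
        · have hxs : rowCheckA c (x :: t) k = rowCheckA c t (k + 1) := by
            simp only [rowCheckA, hx, beq_self_eq_true, if_true]
            rw [if_neg (by simpa using hk4)]
          rw [hxs, ih (k + 1) (by omega)]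
          have e1 : 4 - k = (3 - k) + 1 := by omega
          rw [show 4 - (k + 1) = 3 - k by omega, e1, prefRun_cons, hasWin_cons,
            winP_zero, show (4 : Nat) = 3 + 1 from rfl, prefRun_cons]
          constructor
          · rintro (h | h)
            · exact Or.inl ⟨hx, h⟩
            · exact Or.inr (Or.inr h)
          · rintro (⟨_, h⟩ | ⟨_, h3⟩ | h)
            · exact Or.inl h
            · exact Or.inl (prefRun_mono c (by omega) h3)
            · exact Or.inr h
      · have hxs : rowCheckA c (x :: t) k = rowCheckA c t 0 := by
          simp [rowCheckA, hx]
        rw [hxs, ih 0 (by omega)]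
        rw [hasWin_cons, winP_zero]
        have hpre : ∀ n, 0 < n → ¬ prefRun c n (x :: t) := by
          intro n hn h
          have := h 0 hn
          simp at this
          exact hx this
        constructor
        · rintro (h | h)
          · exact Or.inr (Or.inr ⟨0, (winP_zero c t).mpr h⟩)
          · exact Or.inr (Or.inr h)
        · rintro (h | h | h)
          · exact absurd h (hpre _ (by omega))
          · rw [show (4 : Nat) = 3 + 1 from rfl, prefRun_cons] at h
            exact absurd h.1 hx
          · exact Or.inr h

/-- characterisation of B's inner expression -/
theorem rowAlt_iff (c : Int) (row : List Int) :
    ((List.range (row.length - 3)).any (fun i =>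
      (List.range 4).all (fun j =>
        PySem.List.pyGet? row ((i : Int) + (j : Int)) == some c)) = true)
      ↔ hasWin c row := by
  simp only [List.any_eq_true, List.all_eq_true, List.mem_range, beq_iff_eq]
  constructor
  · rintro ⟨i, _, h⟩
    refine ⟨i, fun j hj => ?_⟩
    have := h j hj
    rwa [show ((i : Int) + (j : Int)) = ((i + j : Nat) : Int) by push_cast; ring,
      PySem.List.pyGet?_natCast] at this
  · rintro ⟨i, hw⟩
    have h3 := hw 3 (by omega)
    have hlen : i + 3 < row.length := by
      by_contra hc
      rw [List.getElem?_eq_none (by omega)] at h3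
      simp at h3
    refine ⟨i, by omega, fun j hj => ?_⟩
    rw [show ((i : Int) + (j : Int)) = ((i + j : Nat) : Int) by push_cast; ring,
      PySem.List.pyGet?_natCast]
    exact hw j hj

theorem row_eq (c : Int) (row : List Int) :
    rowCheckA c row 0 =
      (List.range (row.length - 3)).any (fun i =>
        (List.range 4).all (fun j =>
          PySem.List.pyGet? row ((i : Int) + (j : Int)) == some c)) := by
  rw [Bool.eq_iff_iff, rowCheckA_iff c row 0 (by omega), rowAlt_iff]
  rw [show (4 - 0 : Nat) = 4 from rfl]
  constructor
  · rintro (h | h)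
    · exact ⟨0, (winP_zero c row).mpr h⟩
    · exact h
  · exact Or.inr

-- ===== VERDICT (by name: the statement is the Claim_ definition above) =====
theorem comprobar_filas_spec : Claim_equal_comprobar_filas := by
  intro tablero color _
  unfold Spec_comprobar_filas comprobar_filas comprobar_filas_alt
  congr 1
  funext row
  exact row_eq color row
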